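-- pv_equiv track=rewrite | github.com/TheDying0fLight/ModernSearchEngine | project/retriever/model.py | bag_words
-- ===== SOURCE A (Python) =====
-- def bag_words(words: list[str], doc_freqs: dict[str, int]) -> tuple[dict[str, int], dict[str, int]]:
--     word_bag = {}
--     for word in words:
--         if word in word_bag.keys():
--             word_bag[word] += 1
--         else:
--             word_bag[word] = 1
--             if word in doc_freqs.keys():
--                 doc_freqs[word] += 1
--             else:
--                 doc_freqs[word] = 1
--     return word_bag, doc_freqs
-- ===== SOURCE B (Python) =====
-- def bag_words(words: list[str], doc_freqs: dict[str, int]) -> tuple[dict[str, int], dict[str, int]]: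
--     # Pass 1: count word frequencies.
--     word_bag = {}
--     for w in words:
--         word_bag[w] = word_bag.get(w, 0) + 1
--     # Pass 2: each distinct word occurs in exactly one document here.
--     for w in word_bag:
--         doc_freqs[w] = doc_freqs.get(w, 0) + 1
--     return word_bag, doc_freqs
-- ===== Notes on version B (the rewrite author's own statement) =====
-- stated objective: simpler
-- what changed: Replaces A's single interleaved loop (count plus inline first-seen doc_freq bump guarded by membership tests) with two plain passes: one counting pass, then a separate pass over the distinct words updating doc_freqs with .get.
import Mathlib
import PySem

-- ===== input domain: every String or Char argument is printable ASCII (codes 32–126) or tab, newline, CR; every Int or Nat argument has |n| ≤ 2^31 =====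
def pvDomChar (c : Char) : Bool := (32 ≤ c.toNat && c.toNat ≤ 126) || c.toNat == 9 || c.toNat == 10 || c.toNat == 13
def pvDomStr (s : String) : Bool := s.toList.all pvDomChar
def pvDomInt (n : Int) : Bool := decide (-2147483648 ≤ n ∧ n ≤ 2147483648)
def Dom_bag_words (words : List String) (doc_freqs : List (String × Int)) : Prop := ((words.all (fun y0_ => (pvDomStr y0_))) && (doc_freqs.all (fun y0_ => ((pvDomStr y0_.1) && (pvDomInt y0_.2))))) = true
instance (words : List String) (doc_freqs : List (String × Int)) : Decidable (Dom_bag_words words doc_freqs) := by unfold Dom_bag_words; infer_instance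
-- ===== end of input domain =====

-- B replaces A's single interleaved loop with two plain passes (count, then bump doc_freqs
-- once per distinct word); objective: simpler. doc_freqs is mutated in place by both Pythons.


-- ===== PORT A =====
-- literal transliteration of A: one fold over words carrying (word_bag, doc_freqs),
-- with the nested first-seen update of doc_freqs
def bag_words (words : List String) (doc_freqs : List (String × Int)) : (List (String × Int)) × (List (String × Int)) :=
  let st := words.foldl (fun (st : PySem.Dict String Int × PySem.Dict String Int) word =>
      let word_bag := st.1
      let dfs := st.2
      if word_bag.contains word then
        (word_bag.insert word (word_bag.getD word 0 + 1), dfs)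
      else
        let word_bag := word_bag.insert word 1
        if dfs.contains word then
          (word_bag, dfs.insert word (dfs.getD word 0 + 1))
        else
          (word_bag, dfs.insert word 1))
    (PySem.Dict.empty, PySem.Dict.ofList doc_freqs)
  (st.1.items, st.2.items)

-- ===== PORT B =====
-- transliteration of Source B: counting pass, then a pass over the distinct words
def bag_words_alt (words : List String) (doc_freqs : List (String × Int)) : (List (String × Int)) × (List (String × Int)) :=
  let word_bag := words.foldl (fun (d : PySem.Dict String Int) w => d.insert w (d.getD w 0 + 1)) PySem.Dict.empty
  let dfd := word_bag.keys.foldl (fun (d : PySem.Dict String Int) w => d.insert w (d.getD w 0 + 1)) (PySem.Dict.ofList doc_freqs)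
  (word_bag.items, dfd.items)

-- ===== PRECONDITION & SPEC =====
def Spec_bag_words (words : List String) (doc_freqs : List (String × Int)) (out : (List (String × Int)) × (List (String × Int))) : Prop := out = bag_words_alt words doc_freqs
instance (words : List String) (doc_freqs : List (String × Int)) (out : (List (String × Int)) × (List (String × Int))) : Decidable (Spec_bag_words words doc_freqs out) := by unfold Spec_bag_words; infer_instance

-- ===== CLAIM (what is proved, stated in full; the proofs are below) =====
def Claim_equal_bag_words : Prop := ∀ (words : List String) (doc_freqs : List (String × Int)), Dom_bag_words words doc_freqs → Spec_bag_words words doc_freqs (bag_words words doc_freqs)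

-- ===== LEMMAS AND PROOFS =====

-- the shared "bump by one" dict update
def pvBump (d : PySem.Dict String Int) (w : String) : PySem.Dict String Int :=
  d.insert w (d.getD w 0 + 1)

-- the words of ws not yet in `seen`, first occurrences in order
def pvNews (seen : List String) : List String → List String
  | [] => []
  | w :: ws => if w ∈ seen then pvNews seen ws else w :: pvNews (seen ++ [w]) ws

-- A's branchy updates collapse to pvBump (in the else branch getD returns 0)
theorem pvBump_eq (d : PySem.Dict String Int) (w : String) :
    (if d.contains w then d.insert w (d.getD w 0 + 1) else d.insert w 1) = pvBump d w := by
  by_cases h : d.contains w = true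
  · simp [h, pvBump]
  · simp only [Bool.not_eq_true] at h
    simp [h, pvBump, PySem.Dict.getD_of_not_contains d 0 h]

-- A's fold splits into the counting fold and a fold of pvBump over the fresh words
theorem pvFoldA (ws : List String) (wb df : PySem.Dict String Int) :
    ws.foldl (fun (st : PySem.Dict String Int × PySem.Dict String Int) word =>
      if st.1.contains word then
        (st.1.insert word (st.1.getD word 0 + 1), st.2)
      else
        if st.2.contains word then
          (st.1.insert word 1, st.2.insert word (st.2.getD word 0 + 1))
        else
          (st.1.insert word 1, st.2.insert word 1)) (wb, df)
    = (ws.foldl pvBump wb, (pvNews wb.keys ws).foldl pvBump df) := by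
  induction ws generalizing wb df with
  | nil => simp [pvNews]
  | cons w ws ih =>
    simp only [List.foldl_cons]
    by_cases h : w ∈ wb.keys
    · have hc : wb.contains w = true := (PySem.Dict.contains_iff_mem_keys _ _).mpr h
      rw [if_pos hc, ih]
      have hkeys : (wb.insert w (wb.getD w 0 + 1)).keys = wb.keys :=
        PySem.Dict.keys_insert_of_contains _ _ hc
      simp [pvNews, h, pvBump, hkeys]
    · have hc : wb.contains w = false := by
        rw [PySem.Dict.contains_eq_decide_mem_keys]; simp [h]
      rw [if_neg (by simp [hc])]
      have hb1 : wb.insert w 1 = pvBump wb w := by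
        simpa [hc] using pvBump_eq wb w
      have hb2 : (if df.contains w then df.insert w (df.getD w 0 + 1) else df.insert w 1) = pvBump df w :=
        pvBump_eq df w
      have hkeys : (pvBump wb w).keys = wb.keys ++ [w] := by
        simpa [pvBump] using PySem.Dict.keys_insert_of_not_contains wb ((wb.getD w 0) + 1) hc
      by_cases hd : df.contains w = true
      · rw [if_pos hd, ih]
        simp [pvNews, h, hb1, hkeys]
        rw [show df.insert w (df.getD w 0 + 1) = pvBump df w from rfl]
      · simp only [Bool.not_eq_true] at hd
        rw [if_neg (by simp [hd]), ih]
        have : df.insert w 1 = pvBump df w := by simpa [hd] using pvBump_eq df w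
        simp [pvNews, h, hb1, hkeys, this]

-- the keys of the counting fold are the start keys followed by the fresh words
theorem pvKeysB (ws : List String) (wb : PySem.Dict String Int) :
    (ws.foldl pvBump wb).keys = wb.keys ++ pvNews wb.keys ws := by
  induction ws generalizing wb with
  | nil => simp [pvNews]
  | cons w ws ih =>
    simp only [List.foldl_cons]
    by_cases h : w ∈ wb.keys
    · have hc : wb.contains w = true := (PySem.Dict.contains_iff_mem_keys _ _).mpr h
      have hkeys : (pvBump wb w).keys = wb.keys :=
        PySem.Dict.keys_insert_of_contains _ _ hc
      rw [ih, hkeys]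
      simp [pvNews, h]
    · have hc : wb.contains w = false := by
        rw [PySem.Dict.contains_eq_decide_mem_keys]; simp [h]
      have hkeys : (pvBump wb w).keys = wb.keys ++ [w] := by
        simpa [pvBump] using PySem.Dict.keys_insert_of_not_contains wb ((wb.getD w 0) + 1) hc
      rw [ih, hkeys]
      simp [pvNews, h]

-- ===== VERDICT (by name: the statement is the Claim_ definition above) =====
theorem bag_words_spec : Claim_equal_bag_words := by
  intro words doc_freqs _
  unfold Spec_bag_words bag_words bag_words_alt
  rw [pvFoldA]
  have hk : (words.foldl pvBump PySem.Dict.empty).keys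
      = pvNews (PySem.Dict.empty : PySem.Dict String Int).keys words := by
    simpa using pvKeysB words PySem.Dict.empty
  simp only [show (fun (d : PySem.Dict String Int) w => d.insert w (d.getD w 0 + 1)) = pvBump from rfl, hk]
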